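-- pv_equiv track=rewrite | github.com/veeresh-rathod-au25/MyCoding | Test/2 Test/DSA.py | sea_shell
-- ===== SOURCE A (Python) =====
-- def sea_shell(shells):
--     maxl = 0
--     curr_letter, curr_length = None, 0
--     for sea in shells:
--         if not curr_letter or curr_letter != sea[0]:
--             maxl = max(maxl, curr_length)
--             curr_letter, curr_length = sea[0], 1
--         else:
--             curr_length += 1
--     return max(maxl, curr_length)
-- ===== SOURCE B (Python) =====
-- def sea_shell(shells):
--     # Two-pointer run scanning: find each maximal run of equal first letters
--     # in one jump, keep the best length.
--     best = 0
--     i, n = 0, len(shells)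
--     while i < n:
--         c = shells[i][0]
--         j = i + 1
--         while j < n and shells[j][0] == c:
--             j += 1
--         best = max(j - i, best)
--         i = j
--     return best
-- ===== Notes on version B (the rewrite author's own statement) =====
-- stated objective: alternative
-- what changed: Replaces A's running-counter state machine (curr_letter/curr_length/maxl updated per element) with a two-pointer scan that jumps over each maximal run of equal first letters and takes the max of the run lengths.
import Mathlib
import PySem

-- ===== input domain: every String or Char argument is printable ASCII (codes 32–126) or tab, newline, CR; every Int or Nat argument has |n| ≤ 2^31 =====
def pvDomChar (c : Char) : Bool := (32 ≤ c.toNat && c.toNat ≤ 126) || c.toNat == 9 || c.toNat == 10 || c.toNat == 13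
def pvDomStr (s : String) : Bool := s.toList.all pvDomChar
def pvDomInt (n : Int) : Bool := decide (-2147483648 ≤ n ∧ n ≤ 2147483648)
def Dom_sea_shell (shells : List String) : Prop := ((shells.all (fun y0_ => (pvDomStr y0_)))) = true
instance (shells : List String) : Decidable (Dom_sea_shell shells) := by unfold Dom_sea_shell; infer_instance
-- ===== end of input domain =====

-- B replaces A's running-counter state machine with a two-pointer scan over maximal
-- runs of equal first letters (alternative decomposition, same O(n) cost).


-- ===== PORT A =====
-- sea[0]: Pre_sea_shell excludes the empty string, on which Python raises IndexError;
-- on nonempty strings PySem.Str.pyGet? s 0 is some, so the default is never used inside Pre_.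
def pvFirst (s : String) : Char := (PySem.Str.pyGet? s 0).getD ' '

-- one step of A's for-loop over the state (maxl, curr_letter, curr_length)
def seaStep (st : Int × Option Char × Int) (sea : String) : Int × Option Char × Int :=
  if st.2.1 = none ∨ st.2.1 ≠ some (pvFirst sea) then
    (max st.1 st.2.2, some (pvFirst sea), 1)
  else
    (st.1, st.2.1, st.2.2 + 1)

def sea_shell (shells : List String) : Int :=
  let st := shells.foldl seaStep (0, none, 0)
  max st.1 st.2.2

-- ===== PORT B =====
-- inner while loop: length of the leading run of first-letter c, and the remaining suffix
def pvTakeRun (c : Char) : List String → Int × List String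
  | [] => (0, [])
  | s :: rest =>
    if pvFirst s = c then
      let t := pvTakeRun c rest
      (t.1 + 1, t.2)
    else (0, s :: rest)

theorem pvTakeRun_length (c : Char) : ∀ xs : List String, (pvTakeRun c xs).2.length ≤ xs.length := by
  intro xs
  induction xs with
  | nil => simp [pvTakeRun]
  | cons s rest ih =>
    simp only [pvTakeRun]
    split
    · exact Nat.le_succ_of_le ih
    · exact Nat.le_refl _

-- outer while loop: jump from run to run, keeping the best length
def sea_shell_alt : List String → Int
  | [] => 0
  | s :: rest =>
    let t := pvTakeRun (pvFirst s) rest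
    max (t.1 + 1) (sea_shell_alt t.2)
termination_by xs => xs.length
decreasing_by
  exact Nat.lt_succ_of_le (pvTakeRun_length _ _)

-- ===== PRECONDITION & SPEC =====
-- Pre_ excludes exactly the inputs containing an empty string, on which Python A raises IndexError.
def Pre_sea_shell (shells : List String) : Prop := ∀ s ∈ shells, s ≠ ""
instance (shells : List String) : Decidable (Pre_sea_shell shells) := by unfold Pre_sea_shell; infer_instance

def pvWitness_sea_shell : List String := ["apple", "ant", "bee", "bat", "cat"]

def Spec_sea_shell (shells : List String) (out : Int) : Prop := out = sea_shell_alt shells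
instance (shells : List String) (out : Int) : Decidable (Spec_sea_shell shells out) := by unfold Spec_sea_shell; infer_instance

-- ===== CLAIM (what is proved, stated in full; the proofs are below) =====
def Claim_equal_sea_shell : Prop := ∀ (shells : List String), Dom_sea_shell shells → Pre_sea_shell shells → Spec_sea_shell shells (sea_shell shells)

-- ===== LEMMAS AND PROOFS =====

theorem pvTakeRun_fst_nonneg (c : Char) : ∀ xs : List String, 0 ≤ (pvTakeRun c xs).1 := by
  intro xs
  induction xs with
  | nil => simp [pvTakeRun]
  | cons s rest ih =>
    simp only [pvTakeRun]
    split
    · omega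
    · simp

theorem alt_nil : sea_shell_alt [] = 0 := by
  rw [sea_shell_alt.eq_def]

theorem alt_cons (s : String) (rest : List String) :
    sea_shell_alt (s :: rest)
      = max ((pvTakeRun (pvFirst s) rest).1 + 1) (sea_shell_alt (pvTakeRun (pvFirst s) rest).2) := by
  rw [sea_shell_alt.eq_def]

theorem sea_shell_alt_nonneg : ∀ xs : List String, 0 ≤ sea_shell_alt xs := by
  intro xs
  fun_induction sea_shell_alt with
  | case1 => simp
  | case2 s rest t ih =>
    simp only [t] at ih ⊢
    have := pvTakeRun_fst_nonneg (pvFirst s) rest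
    omega

-- invariant of A's loop from an active state (maxl, some c, n):
-- finishing equals max of maxl, the completed current run (n + leading run of c), and the best over the suffix
theorem seaAux : ∀ (xs : List String) (maxl n : Int) (c : Char), 0 ≤ n →
    (let st := xs.foldl seaStep (maxl, some c, n); max st.1 st.2.2)
      = max maxl (max (n + (pvTakeRun c xs).1) (sea_shell_alt (pvTakeRun c xs).2)) := by
  intro xs
  induction xs with
  | nil =>
    intro maxl n c hn
    simp only [List.foldl, pvTakeRun]
    rw [alt_nil]
    omega
  | cons s rest ih =>
    intro maxl n c hn
    by_cases h : pvFirst s = c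
    · have hstep : seaStep (maxl, some c, n) s = (maxl, some c, n + 1) := by
        simp [seaStep, h]
      simp only [List.foldl, hstep, pvTakeRun, if_pos h]
      have := ih maxl (n + 1) c (by omega)
      simp only at this
      rw [this]
      omega
    · have hstep : seaStep (maxl, some c, n) s = (max maxl n, some (pvFirst s), 1) := by
        simp [seaStep]
        intro hc
        exact absurd hc.symm h
      simp only [List.foldl, hstep, pvTakeRun, if_neg h]
      have := ih (max maxl n) 1 (pvFirst s) (by omega)
      simp only at this
      rw [this, alt_cons]
      have h1 := pvTakeRun_fst_nonneg (pvFirst s) rest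
      have h2 := sea_shell_alt_nonneg (pvTakeRun (pvFirst s) rest).2
      omega

-- ===== VERDICT (by name: the statement is the Claim_ definition above) =====
theorem sea_shell_spec : Claim_equal_sea_shell := by
  intro shells _ _
  unfold Spec_sea_shell
  cases shells with
  | nil => simp [sea_shell, sea_shell_alt, List.foldl]
  | cons s rest =>
    have hstep : seaStep (0, none, 0) s = (0, some (pvFirst s), 1) := by
      simp [seaStep]
    show (let st := (s :: rest).foldl seaStep (0, none, 0); max st.1 st.2.2) = _
    simp only [List.foldl, hstep]
    have := seaAux rest 0 1 (pvFirst s) (by omega)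
    simp only at this
    rw [this, alt_cons]
    have h1 := pvTakeRun_fst_nonneg (pvFirst s) rest
    have h2 := sea_shell_alt_nonneg (pvTakeRun (pvFirst s) rest).2
    omega
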